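-- pv_equiv track=rewrite | github.com/kb1907/Python_Codes | Code-Challenges-main/Codewars/main.py | same_vowel
-- ===== SOURCE A (Python) =====
-- def same_vowel(l):
--     l1 = set()
--     z = ['a', 'e', 'i', 'o', 'u']
--     output = [l[0]]
--     [l1.update(x) for x in l[0] if x in z]
--     for x in l[1:]:
--         if set([i for i in x if i in z]) == l1:
--             output.append(x)
--     return output
-- ===== SOURCE B (Python) =====
-- def same_vowel(l):
--     # Group every word by its vowel-presence key in one dict pass, then return
--     # the bucket of the first word's key.  (Raises IndexError on [] like A.)
--     def key(w):
--         return ('a' in w, 'e' in w, 'i' in w, 'o' in w, 'u' in w)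
--     k0 = key(l[0])
--     groups = {}
--     for w in l:
--         groups.setdefault(key(w), []).append(w)
--     return groups[k0]
-- ===== Notes on version B (the rewrite author's own statement) =====
-- stated objective: faster
-- what changed: Instead of building the first word's vowel set and constructing a fresh character set per word to compare, B groups all words into a dict keyed by a cheap 5-tuple of vowel-presence flags in one pass and returns the first word's bucket.
import Mathlib
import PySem

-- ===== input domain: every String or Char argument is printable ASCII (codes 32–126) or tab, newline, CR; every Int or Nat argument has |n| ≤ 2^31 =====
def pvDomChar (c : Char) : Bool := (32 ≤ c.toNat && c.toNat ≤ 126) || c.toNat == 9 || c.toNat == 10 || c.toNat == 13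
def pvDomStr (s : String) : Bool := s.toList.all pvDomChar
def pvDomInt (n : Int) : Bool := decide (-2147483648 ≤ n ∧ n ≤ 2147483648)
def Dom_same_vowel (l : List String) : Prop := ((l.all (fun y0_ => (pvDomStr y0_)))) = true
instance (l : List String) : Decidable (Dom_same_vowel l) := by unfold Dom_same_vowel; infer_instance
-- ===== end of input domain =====

-- B groups words by a 5-tuple of vowel-presence flags in one dict pass and returns the first
-- word's bucket, instead of A's build-a-set-and-rescan filter; return values proved equal on
-- nonempty lists (both raise IndexError on []).

-- ===== PORT A =====
def same_vowel (l : List String) : List String :=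
  match l with
  | [] => []   -- Python: l[0] raises IndexError; excluded by Pre_same_vowel
  | h :: t =>
    let z : List Char := ['a', 'e', 'i', 'o', 'u']
    -- [l1.update(x) for x in l[0] if x in z]
    let l1 : PySem.Set Char :=
      h.toList.foldl (fun s x => if z.contains x then PySem.Set.add s x else s) PySem.Set.empty
    -- for x in l[1:]: if set([i for i in x if i in z]) == l1: output.append(x)
    t.foldl (fun out x =>
      if PySem.Set.equal (PySem.Set.ofList (x.toList.filter (fun i => z.contains i))) l1 then
        out ++ [x]
      else out) [h]

-- ===== PORT B =====
-- key(w) = ('a' in w, 'e' in w, 'i' in w, 'o' in w, 'u' in w)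
-- ('v' in w for a single char is exactly char membership in w's characters)
def svKey (w : String) : List Bool :=
  [w.toList.contains 'a', w.toList.contains 'e', w.toList.contains 'i',
   w.toList.contains 'o', w.toList.contains 'u']

def same_vowel_alt (l : List String) : List String :=
  match l with
  | [] => []   -- Python: l[0] raises IndexError; excluded by Pre_same_vowel
  | h :: t =>
    let k0 := svKey h
    -- for w in l: groups.setdefault(key(w), []).append(w)   (= modify: bucket gets w appended)
    let groups : PySem.Dict (List Bool) (List String) :=
      (h :: t).foldl (fun d w => d.modify (svKey w) [] (fun ws => ws ++ [w])) PySem.Dict.empty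
    groups.getD k0 []   -- groups[k0]; the key is present since l[0] was grouped

-- ===== PRECONDITION & SPEC =====
-- Pre_ excludes only the empty list, on which A raises IndexError.
def Pre_same_vowel (l : List String) : Prop := l ≠ []
instance (l : List String) : Decidable (Pre_same_vowel l) := by unfold Pre_same_vowel; infer_instance
def pvWitness_same_vowel : List String := ["tea", "eat", "b"]

def Spec_same_vowel (l : List String) (out : List String) : Prop := out = same_vowel_alt l
instance (l : List String) (out : List String) : Decidable (Spec_same_vowel l out) := by unfold Spec_same_vowel; infer_instance

-- ===== CLAIM =====
def Claim_equal_same_vowel : Prop := ∀ (l : List String), Dom_same_vowel l → Pre_same_vowel l → Spec_same_vowel l (same_vowel l)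

-- ===== LEMMAS AND PROOFS =====

theorem svKey_eq_iff (x h : String) :
    svKey x = svKey h ↔
      PySem.Set.equal
        (PySem.Set.ofList (x.toList.filter (fun i => (['a','e','i','o','u'] : List Char).contains i)))
        (PySem.Set.ofList (h.toList.filter (fun i => (['a','e','i','o','u'] : List Char).contains i))) = true := by
  rw [PySem.Set.equal_iff]
  have hcontains : ∀ (c : Char), (x.toList.contains c = h.toList.contains c) ↔ (c ∈ x.toList ↔ c ∈ h.toList) := by
    intro c; simp [List.contains_eq_mem, decide_eq_decide]
  have hmem : ∀ (w : String) (c : Char),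
      c ∈ PySem.Set.ofList (w.toList.filter (fun i => (['a','e','i','o','u'] : List Char).contains i)) ↔
        (c ∈ w.toList ∧ c ∈ (['a','e','i','o','u'] : List Char)) := by
    intro w c; simp [PySem.Set.mem_ofList, List.mem_filter]
  have hkey : svKey x = svKey h ↔
      ∀ c ∈ (['a','e','i','o','u'] : List Char), (c ∈ x.toList ↔ c ∈ h.toList) := by
    simp only [svKey, List.cons.injEq, and_true, hcontains]
    constructor
    · rintro ⟨ha, he, hi, ho, hu⟩ c hc
      fin_cases hc <;> assumption
    · intro hall
      exact ⟨hall _ (by decide), hall _ (by decide), hall _ (by decide),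
        hall _ (by decide), hall _ (by decide)⟩
  rw [hkey]
  constructor
  · intro hall c
    rw [hmem, hmem]
    by_cases hz : c ∈ (['a','e','i','o','u'] : List Char)
    · simp [hz, hall c hz]
    · simp [hz]
  · intro hall c hc
    have := hall c
    rw [hmem, hmem] at this
    simp [hc] at this
    exact this

theorem groups_getD (l : List String) (k : List Bool) (d : PySem.Dict (List Bool) (List String)) :
    (l.foldl (fun d w => d.modify (svKey w) [] (fun ws => ws ++ [w])) d).getD k [] =
      d.getD k [] ++ l.filter (fun w => svKey w == k) := by
  induction l generalizing d with
  | nil => simp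
  | cons w ws ih =>
    simp only [List.foldl_cons, ih, List.filter_cons]
    rw [PySem.Dict.getD_modify]
    by_cases hk : k = svKey w
    · subst hk
      simp
    · simp [hk, beq_iff_eq, Ne.symm hk]

-- ===== VERDICT =====
theorem same_vowel_spec : Claim_equal_same_vowel := by
  intro l _ hpre
  unfold Spec_same_vowel
  match l with
  | [] => exact absurd rfl hpre
  | h :: t =>
    simp only [same_vowel, same_vowel_alt]
    have hl1 : h.toList.foldl
        (fun s x => if (['a','e','i','o','u'] : List Char).contains x then PySem.Set.add s x else s)
        PySem.Set.empty =
        PySem.Set.ofList (h.toList.filter (fun i => (['a','e','i','o','u'] : List Char).contains i)) := by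
      rw [PySem.Set.ofList_eq_foldl, List.foldl_filter]; rfl
    rw [hl1, PySem.List.foldl_append_if_eq_filter, groups_getD]
    simp only [PySem.Dict.getD_empty, List.nil_append, List.filter_cons, beq_self_eq_true,
      if_pos, List.singleton_append]
    congr 1
    apply List.filter_congr
    intro x _
    rw [Bool.eq_iff_iff, beq_iff_eq, svKey_eq_iff]
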